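-- pv_equiv track=rewrite | github.com/strangeloopcanon/Horace | tools/gen_compare.py | rhyme_key
-- ===== SOURCE A (Python) =====
-- def rhyme_key(word: str) -> str:
--     w = ''.join([c for c in word.lower() if c.isalpha()])
--     if not w:
--         return ''
--     vowels = set('aeiouy')
--     end = len(w)
--     i = end - 1
--     while i >= 0 and w[i] not in vowels:
--         i -= 1
--     while i >= 0 and w[i] in vowels:
--         i -= 1
--     start = i + 1
--     key = w[start:end]
--     if len(key) < 3:
--         key = w[-3:] if len(w) >= 3 else w
--     return key
-- ===== SOURCE B (Python) =====
-- import re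
--
-- def rhyme_key(word: str) -> str:
--     w = ''.join(c for c in word.lower() if c.isalpha())
--     if not w:
--         return ''
--     # chunks of w: maximal runs of vowels followed by the consonants after them;
--     # the last chunk is the rhyme suffix (no chunk = no vowel at all: keep w)
--     chunks = re.findall(r'[aeiouy]+[^aeiouy]*', w)
--     key = chunks[-1] if chunks else w
--     return key if len(key) >= 3 else w[-3:]
-- ===== Notes on version B (the rewrite author's own statement) =====
-- stated objective: idiomatic
-- what changed: The two index-based backward while-loops are replaced by one regex pass: re.findall(r'[aeiouy]+[^aeiouy]*', w) splits the cleaned word into vowel-led chunks and the last chunk is the rhyme key (no chunk = no vowel: keep w), with the <3 fallback collapsed to one clamped w[-3:].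
import Mathlib
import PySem

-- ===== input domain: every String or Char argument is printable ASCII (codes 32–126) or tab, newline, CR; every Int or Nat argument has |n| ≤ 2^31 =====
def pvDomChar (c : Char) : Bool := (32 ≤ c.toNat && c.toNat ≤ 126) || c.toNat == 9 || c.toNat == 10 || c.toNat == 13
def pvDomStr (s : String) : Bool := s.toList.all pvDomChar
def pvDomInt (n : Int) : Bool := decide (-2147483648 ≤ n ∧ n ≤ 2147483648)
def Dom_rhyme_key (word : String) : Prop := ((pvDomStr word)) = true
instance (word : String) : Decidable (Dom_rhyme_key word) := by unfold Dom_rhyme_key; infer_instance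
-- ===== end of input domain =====

-- B replaces A's two index-walking backward while-loops by one regex split of the word into
-- vowel-led chunks (re.findall of [aeiouy]+[^aeiouy]*), keeping the last chunk; same O(n) cost, more idiomatic.

-- ===== PORT A =====
-- `while i >= 0 and w[i] not in vowels: i -= 1` scanned from n-1 downward; argument is i+1 (0 = loop left with i = -1),
-- result is the final i+1 = start of the trailing non-vowel run. Index n is always < w.length here, so getD is exact.
def pvLoopNonVowel (w vowels : List Char) : Nat → Nat
  | 0 => 0
  | n+1 => if w.getD n ' ' ∈ vowels then n + 1 else pvLoopNonVowel w vowels n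

-- `while i >= 0 and w[i] in vowels: i -= 1`, same encoding; result is the final i+1.
def pvLoopVowel (w vowels : List Char) : Nat → Nat
  | 0 => 0
  | n+1 => if w.getD n ' ' ∈ vowels then pvLoopVowel w vowels n else n + 1

def rhyme_key (word : String) : String :=
  let w : List Char := (PySem.Chars.lower word.toList).filter PySem.Chars.isalpha
  if w = [] then "" else
  let vowels : List Char := PySem.Set.ofList "aeiouy".toList
  let endN := w.length
  let start := pvLoopVowel w vowels (pvLoopNonVowel w vowels endN)
  let key := PySem.List.slice w (some (start : Int)) (some (endN : Int))
  if key.length < 3 then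
    if 3 ≤ w.length then String.ofList (PySem.List.slice w (some (-3)) none) else String.ofList w
  else String.ofList key

-- ===== PORT B =====
def pvIsV (c : Char) : Bool := decide (c ∈ "aeiouy".toList)

-- hand port of re.findall(r'[aeiouy]+[^aeiouy]*', w): left to right, non-overlapping; a match can
-- only start at a vowel, and greedily takes the whole vowel run plus the non-vowels after it (exact)
def pvFindAll : List Char → List (List Char)
  | [] => []
  | c :: cs =>
    if h : pvIsV c = true then
      ((c :: cs).takeWhile pvIsV
          ++ ((c :: cs).dropWhile pvIsV).takeWhile (fun ch => !pvIsV ch))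
        :: pvFindAll (((c :: cs).dropWhile pvIsV).dropWhile (fun ch => !pvIsV ch))
    else pvFindAll cs
termination_by l => l.length
decreasing_by
  · have h1 : ((c :: cs).dropWhile pvIsV).length ≤ cs.length := by
      rw [List.dropWhile_cons_of_pos h]
      exact List.length_dropWhile_le pvIsV cs
    have h2 := List.length_dropWhile_le (fun ch => !pvIsV ch) ((c :: cs).dropWhile pvIsV)
    simp only [List.length_cons]
    omega
  · simp only [List.length_cons]
    omega

def rhyme_key_alt (word : String) : String :=
  let w : List Char := (PySem.Chars.lower word.toList).filter PySem.Chars.isalpha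
  if w = [] then "" else
  let key := (pvFindAll w).getLast?.getD w
  if 3 ≤ key.length then String.ofList key
  else String.ofList (PySem.List.slice w (some (-3)) none)

-- ===== PRECONDITION & SPEC =====
def Spec_rhyme_key (word : String) (out : String) : Prop := out = rhyme_key_alt word
instance (word : String) (out : String) : Decidable (Spec_rhyme_key word out) := by unfold Spec_rhyme_key; infer_instance

-- ===== CLAIM =====
def Claim_equal_rhyme_key : Prop := ∀ (word : String), Dom_rhyme_key word → Spec_rhyme_key word (rhyme_key word)

-- ===== LEMMAS AND PROOFS =====

-- proof-side model of re.search of the end-anchored pattern [aeiouy]+[^aeiouy]*$: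
-- the leftmost suffix that is a nonempty vowel run followed only by non-vowels
def pvMatchAt (s : List Char) : Bool :=
  !(s.takeWhile pvIsV).isEmpty && (s.dropWhile pvIsV).all (fun c => !pvIsV c)

def pvSearch : List Char → Option (List Char)
  | [] => none
  | c :: cs => if pvMatchAt (c :: cs) then some (c :: cs) else pvSearch cs


-- stability: the loops only look at indices < n, so appending on the right does not change them
lemma pvLoopNV_append (V ys zs : List Char) :
    ∀ n, n ≤ ys.length → pvLoopNonVowel (ys ++ zs) V n = pvLoopNonVowel ys V n := by
  intro n
  induction n with
  | zero => intro _; rfl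
  | succ m ih =>
    intro h
    have hm : m < ys.length := h
    unfold pvLoopNonVowel
    rw [List.getD_append _ _ _ _ hm]
    split
    · rfl
    · exact ih (le_of_lt hm)

lemma pvLoopV_append (V ys zs : List Char) :
    ∀ n, n ≤ ys.length → pvLoopVowel (ys ++ zs) V n = pvLoopVowel ys V n := by
  intro n
  induction n with
  | zero => intro _; rfl
  | succ m ih =>
    intro h
    have hm : m < ys.length := h
    unfold pvLoopVowel
    rw [List.getD_append _ _ _ _ hm]
    split
    · exact ih (le_of_lt hm)
    · rfl

-- the first loop leaves i+1 = length of the reverse with the leading (= trailing in w) non-vowels dropped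
lemma pvLoopNV_spec (V : List Char) :
    ∀ w : List Char, pvLoopNonVowel w V w.length
      = (w.reverse.dropWhile (fun c => !decide (c ∈ V))).length := by
  intro w
  induction w using List.reverseRecOn with
  | nil => rfl
  | append_singleton ys c ih =>
    have hlen : (ys ++ [c]).length = ys.length + 1 := by simp
    rw [hlen]
    unfold pvLoopNonVowel
    have hget : (ys ++ [c]).getD ys.length ' ' = c := by
      simp [List.getD]
    rw [hget, List.reverse_append]
    by_cases hc : c ∈ V
    · simp [hc]
    · simp [hc, pvLoopNV_append V ys [c] ys.length le_rfl, ih]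

lemma pvLoopV_spec (V : List Char) :
    ∀ w : List Char, pvLoopVowel w V w.length
      = (w.reverse.dropWhile (fun c => decide (c ∈ V))).length := by
  intro w
  induction w using List.reverseRecOn with
  | nil => rfl
  | append_singleton ys c ih =>
    have hlen : (ys ++ [c]).length = ys.length + 1 := by simp
    rw [hlen]
    unfold pvLoopVowel
    have hget : (ys ++ [c]).getD ys.length ' ' = c := by
      simp [List.getD]
    rw [hget, List.reverse_append]
    by_cases hc : c ∈ V
    · simp [hc, pvLoopV_append V ys [c] ys.length le_rfl, ih]
    · simp [hc]

-- the v*c* shape (all vowels before all non-vowels) is inherited by every suffix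
lemma pvShape_suffix (a b : List Char)
    (h : ((a ++ b).dropWhile pvIsV).all (fun c => !pvIsV c) = true) :
    (b.dropWhile pvIsV).all (fun c => !pvIsV c) = true := by
  induction a with
  | nil => exact h
  | cons x a ih =>
    by_cases hx : pvIsV x = true
    · rw [List.cons_append, List.dropWhile_cons, if_pos hx] at h
      exact ih h
    · rw [List.cons_append, List.dropWhile_cons, if_neg hx] at h
      rw [List.all_cons, Bool.and_eq_true, List.all_append, Bool.and_eq_true] at h
      have hb : b.all (fun c => !pvIsV c) = true := h.2.2
      have : b.dropWhile pvIsV = b := by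
        cases b with
        | nil => rfl
        | cons y ys =>
          rw [List.all_cons, Bool.and_eq_true] at hb
          rw [List.dropWhile_cons, if_neg (by simpa using hb.1)]
      rw [this]; exact hb

-- no suffix that still contains a non-vowel followed later by a vowel can match the pattern
lemma pvMatch_false (a : List Char) (x : Char) (s0 : List Char)
    (hx : pvIsV x = false) (hz : ∃ z ∈ s0, pvIsV z = true) :
    pvMatchAt (a ++ x :: s0) = false := by
  by_contra h
  rw [Bool.not_eq_false, pvMatchAt, Bool.and_eq_true] at h
  have hq := pvShape_suffix a (x :: s0) h.2
  rw [List.dropWhile_cons, if_neg (by simp [hx]), List.all_cons, Bool.and_eq_true] at hq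
  obtain ⟨z, hzm, hzv⟩ := hz
  have := List.all_eq_true.mp hq.2 z hzm
  simp [hzv] at this

lemma pvSearch_skip (a : List Char) (x : Char) (s0 : List Char)
    (hx : pvIsV x = false) (hz : ∃ z ∈ s0, pvIsV z = true) :
    pvSearch (a ++ x :: s0) = pvSearch s0 := by
  induction a with
  | nil =>
    have hm := pvMatch_false [] x s0 hx hz
    rw [List.nil_append] at hm
    rw [List.nil_append, pvSearch, hm]
    simp
  | cons y a ih =>
    have hm := pvMatch_false (y :: a) x s0 hx hz
    rw [List.cons_append] at hm
    rw [List.cons_append, pvSearch, hm]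
    simpa using ih

-- a word with no vowel at all has no match
lemma pvSearch_none (s : List Char) (h : ∀ z ∈ s, pvIsV z = false) : pvSearch s = none := by
  induction s with
  | nil => rfl
  | cons x xs ih =>
    rw [pvSearch, if_neg, ih (fun z hz => h z (List.mem_cons_of_mem x hz))]
    have hx := h x List.mem_cons_self
    simp [pvMatchAt, hx]

lemma pvTakeWhile_none (c : List Char) (hca : ∀ z ∈ c, pvIsV z = false) :
    c.takeWhile pvIsV = [] := by
  cases c with
  | nil => rfl
  | cons y ys => rw [List.takeWhile_cons, if_neg (by simp [hca y List.mem_cons_self])]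

lemma pvDropWhile_none (c : List Char) (hca : ∀ z ∈ c, pvIsV z = false) :
    c.dropWhile pvIsV = c := by
  cases c with
  | nil => rfl
  | cons y ys => rw [List.dropWhile_cons, if_neg (by simp [hca y List.mem_cons_self])]

lemma pvTakeWhile_vc (c : List Char) (hca : ∀ z ∈ c, pvIsV z = false) :
    ∀ v, (∀ z ∈ v, pvIsV z = true) → (v ++ c).takeWhile pvIsV = v := by
  intro v
  induction v with
  | nil => intro _; simpa using pvTakeWhile_none c hca
  | cons x xs ih =>
    intro hva
    rw [List.cons_append, List.takeWhile_cons, if_pos (hva x List.mem_cons_self),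
      ih (fun z hz => hva z (List.mem_cons_of_mem x hz))]

lemma pvDropWhile_vc (c : List Char) (hca : ∀ z ∈ c, pvIsV z = false) :
    ∀ v, (∀ z ∈ v, pvIsV z = true) → (v ++ c).dropWhile pvIsV = c := by
  intro v
  induction v with
  | nil => intro _; simpa using pvDropWhile_none c hca
  | cons x xs ih =>
    intro hva
    rw [List.cons_append, List.dropWhile_cons, if_pos (hva x List.mem_cons_self),
      ih (fun z hz => hva z (List.mem_cons_of_mem x hz))]

-- the suffix consisting of a nonempty vowel run followed by non-vowels matches, and is what search returns
lemma pvSearch_hit (v c : List Char) (hv : v ≠ []) (hva : ∀ z ∈ v, pvIsV z = true)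
    (hca : ∀ z ∈ c, pvIsV z = false) : pvSearch (v ++ c) = some (v ++ c) := by
  have hmatch : pvMatchAt (v ++ c) = true := by
    rw [pvMatchAt, pvTakeWhile_vc c hca v hva, pvDropWhile_vc c hca v hva, Bool.and_eq_true]
    exact ⟨by simpa using hv, List.all_eq_true.mpr (fun z hz => by simp [hca z hz])⟩
  cases v with
  | nil => exact absurd rfl hv
  | cons x xs =>
    rw [List.cons_append] at hmatch ⊢
    rw [pvSearch, hmatch]
    simp

-- head of a nonempty dropWhile fails the predicate
lemma pvHeadDropFalse (p : Char → Bool) (l : List Char) (x : Char) (xs : List Char)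
    (h : l.dropWhile p = x :: xs) : p x = false := by
  have hne : l.dropWhile p ≠ [] := by simp [h]
  have h2 := List.head_dropWhile_not (p := p) hne
  have hx : (l.dropWhile p).head hne = x := by simp [h]
  rw [hx] at h2
  simpa using h2

-- the regex search returns exactly the suffix A isolates: drop the trailing consonant run and
-- keep from the start of the last vowel run (= drop |rest| chars, rest = reverse stripped twice)
lemma pvMain (w : List Char) :
    (pvSearch w).getD w
      = w.drop ((w.reverse.dropWhile (fun c => !pvIsV c)).dropWhile pvIsV).length := by
  set cR := w.reverse.takeWhile (fun c => !pvIsV c) with hcR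
  set r1 := w.reverse.dropWhile (fun c => !pvIsV c) with hr1
  set vR := r1.takeWhile pvIsV with hvR
  set tR := r1.dropWhile pvIsV with htR
  have hcall : ∀ z ∈ cR, pvIsV z = false := by
    intro z hz; rw [hcR] at hz; simpa using List.mem_takeWhile_imp hz
  have hvall : ∀ z ∈ vR, pvIsV z = true := by
    intro z hz; rw [hvR] at hz; exact List.mem_takeWhile_imp hz
  have hw : w = tR.reverse ++ (vR.reverse ++ cR.reverse) := by
    conv_lhs => rw [← w.reverse_reverse]
    have h1 : w.reverse = cR ++ r1 := by rw [hcR, hr1, List.takeWhile_append_dropWhile]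
    have h2 : r1 = vR ++ tR := by rw [hvR, htR, List.takeWhile_append_dropWhile]
    rw [h1, h2]
    simp [List.reverse_append, List.append_assoc]
  cases htR0 : tR with
  | nil =>
    rw [htR0] at hw
    simp only [List.reverse_nil, List.nil_append] at hw
    simp only [List.length_nil, List.drop_zero]
    by_cases hv0 : vR = []
    · rw [hv0] at hw
      simp only [List.reverse_nil, List.nil_append] at hw
      have : pvSearch w = none :=
        pvSearch_none w (by intro z hz; rw [hw] at hz; exact hcall z (List.mem_reverse.mp hz))
      rw [this]; rfl
    · have : pvSearch w = some w := by
        conv_lhs => rw [hw]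
        rw [pvSearch_hit vR.reverse cR.reverse (by simpa using hv0)
          (fun z hz => hvall z (List.mem_reverse.mp hz))
          (fun z hz => hcall z (List.mem_reverse.mp hz)), ← hw]
      rw [this]; rfl
  | cons x t' =>
    have hx : pvIsV x = false :=
      pvHeadDropFalse pvIsV r1 x t' (by rw [← htR]; exact htR0)
    have hvne : vR ≠ [] := by
      intro hv0
      have hr1eq : r1 = x :: t' := by
        rw [show r1 = vR ++ tR from by rw [hvR, htR, List.takeWhile_append_dropWhile], hv0, htR0]
        simp
      have := pvHeadDropFalse (fun c => !pvIsV c) w.reverse x t' (by rw [← hr1]; exact hr1eq)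
      simp [hx] at this
    obtain ⟨y, vtl, hy⟩ : ∃ y vtl, vR = y :: vtl := by
      cases hvc : vR with
      | nil => exact absurd hvc hvne
      | cons a b => exact ⟨a, b, rfl⟩
    have hz : ∃ z ∈ vR.reverse ++ cR.reverse, pvIsV z = true :=
      ⟨y, by simp [hy], hvall y (by simp [hy])⟩
    have hwx : w = t'.reverse ++ x :: (vR.reverse ++ cR.reverse) := by
      rw [hw, htR0]
      simp [List.append_assoc]
    have hsearch : pvSearch w = some (vR.reverse ++ cR.reverse) := by
      rw [hwx, pvSearch_skip t'.reverse x _ hx hz]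
      exact pvSearch_hit vR.reverse cR.reverse (by simp [hy])
        (fun z hz' => hvall z (List.mem_reverse.mp hz'))
        (fun z hz' => hcall z (List.mem_reverse.mp hz'))
    have hdrop : w.drop (x :: t').length = vR.reverse ++ cR.reverse := by
      conv_lhs => rw [hwx]
      have hlen : (x :: t').length = (t'.reverse ++ [x]).length := by simp
      rw [hlen]
      have hdl : List.drop (t'.reverse ++ [x]).length
          ((t'.reverse ++ [x]) ++ (vR.reverse ++ cR.reverse)) = vR.reverse ++ cR.reverse :=
        List.drop_left
      rw [List.append_assoc] at hdl
      simpa using hdl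
    rw [hsearch, hdrop]
    rfl

-- findall's last chunk is exactly what the end-anchored search finds
lemma pvBridge (s : List Char) : (pvFindAll s).getLast? = pvSearch s := by
  induction s using pvFindAll.induct with
  | case1 => simp [pvFindAll, pvSearch]
  | case3 c cs h ih =>
    have hm : pvMatchAt (c :: cs) = false := by
      simp [pvMatchAt, h]
    rw [pvFindAll]
    simp only [h]
    rw [pvSearch, hm]
    simpa using ih
  | case2 c cs h ih =>
    have hvne : (c :: cs).takeWhile pvIsV ≠ [] := by
      rw [List.takeWhile_cons_of_pos h]; simp
    have hvall : ∀ z ∈ (c :: cs).takeWhile pvIsV, pvIsV z = true :=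
      fun z hz => List.mem_takeWhile_imp hz
    have hkall : ∀ z ∈ ((c :: cs).dropWhile pvIsV).takeWhile (fun ch => !pvIsV ch),
        pvIsV z = false := fun z hz => by simpa using List.mem_takeWhile_imp hz
    have hdecomp : c :: cs
        = (c :: cs).takeWhile pvIsV
          ++ (((c :: cs).dropWhile pvIsV).takeWhile (fun ch => !pvIsV ch)
          ++ ((c :: cs).dropWhile pvIsV).dropWhile (fun ch => !pvIsV ch)) := by
      rw [List.takeWhile_append_dropWhile, List.takeWhile_append_dropWhile]
    rw [pvFindAll]
    simp only [h, reduceDIte]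
    cases hrest : ((c :: cs).dropWhile pvIsV).dropWhile (fun ch => !pvIsV ch) with
    | nil =>
      rw [hrest] at hdecomp ih
      simp only [List.append_nil] at hdecomp
      have h0 : pvFindAll [] = [] := by rw [pvFindAll]
      rw [h0]
      conv_rhs => rw [hdecomp]
      rw [pvSearch_hit _ _ hvne hvall hkall]
      simp
    | cons x r2 =>
      have hx : pvIsV x = true := by
        have := pvHeadDropFalse (fun ch => !pvIsV ch) ((c :: cs).dropWhile pvIsV) x r2 hrest
        simpa using this
      have hkne : ((c :: cs).dropWhile pvIsV).takeWhile (fun ch => !pvIsV ch) ≠ [] := by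
        cases hrw : (c :: cs).dropWhile pvIsV with
        | nil => rw [hrw] at hrest; simp at hrest
        | cons y ys =>
          have hy : pvIsV y = false := pvHeadDropFalse pvIsV (c :: cs) y ys hrw
          simp [hy]
      obtain ⟨k0, xk, hk⟩ := (List.eq_nil_or_concat _).resolve_left hkne
      rw [List.concat_eq_append] at hk
      have hxk : pvIsV xk = false := hkall xk (by simp [hk])
      have hfne : pvFindAll (x :: r2) ≠ [] := by
        rw [pvFindAll]
        simp [hx]
      have hsearch : pvSearch (c :: cs) = pvSearch (x :: r2) := by
        conv_lhs => rw [hdecomp, hrest, hk]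
        rw [show (k0 ++ [xk]) ++ x :: r2 = k0 ++ xk :: x :: r2 by simp,
          ← List.append_assoc]
        exact pvSearch_skip _ xk _ hxk ⟨x, by simp, hx⟩
      rw [hrest] at ih
      obtain ⟨b, l', hl⟩ : ∃ b l', pvFindAll (x :: r2) = b :: l' := by
        cases hfa : pvFindAll (x :: r2) with
        | nil => exact absurd hfa hfne
        | cons b l' => exact ⟨b, l', rfl⟩
      rw [hsearch, ← ih, hl, List.getLast?_cons_cons]

-- ===== VERDICT =====
theorem rhyme_key_spec : Claim_equal_rhyme_key := by
  intro word _
  unfold Spec_rhyme_key rhyme_key rhyme_key_alt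
  simp only []
  set w : List Char := (PySem.Chars.lower word.toList).filter PySem.Chars.isalpha with hwdef
  by_cases hnil : w = []
  · simp [hnil]
  · simp only [if_neg hnil]
    have hset : PySem.Set.ofList "aeiouy".toList = "aeiouy".toList := by decide
    rw [hset]
    have hk : pvLoopVowel w "aeiouy".toList (pvLoopNonVowel w "aeiouy".toList w.length)
        = ((w.reverse.dropWhile (fun c => !pvIsV c)).dropWhile pvIsV).length := by
      set V : List Char := "aeiouy".toList with hV
      set r1 := w.reverse.dropWhile (fun c => !decide (c ∈ V)) with hr1
      have hw2 : w = r1.reverse ++ (w.reverse.takeWhile (fun c => !decide (c ∈ V))).reverse := by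
        conv_lhs => rw [← w.reverse_reverse,
          ← List.takeWhile_append_dropWhile (p := fun c => !decide (c ∈ V)) (l := w.reverse)]
        rw [List.reverse_append, hr1]
      have h1 : pvLoopVowel w V r1.length = pvLoopVowel r1.reverse V r1.length := by
        conv_lhs => rw [hw2]
        exact pvLoopV_append V r1.reverse _ r1.length (by simp)
      have h2 := pvLoopV_spec V r1.reverse
      rw [List.length_reverse, List.reverse_reverse] at h2
      rw [pvLoopNV_spec V w, ← hr1, h1, h2, hr1, hV]
      simp only [show (fun c : Char => decide (c ∈ "aeiouy".toList)) = pvIsV from rfl,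
        show (fun c : Char => !decide (c ∈ "aeiouy".toList)) = (fun c => !pvIsV c) from rfl]
    rw [hk]
    set k := ((w.reverse.dropWhile (fun c => !pvIsV c)).dropWhile pvIsV).length with hkdef
    have hsliceA : PySem.List.slice w (some (k : Int)) (some (w.length : Int)) = w.drop k := by
      rw [PySem.List.slice_natCast]
      rw [← List.length_drop (i := k) (l := w)]
      exact List.take_length
    rw [hsliceA, pvBridge w, pvMain w, ← hkdef]
    by_cases h3 : (w.drop k).length < 3
    · rw [if_pos h3, if_neg (show ¬ 3 ≤ (w.drop k).length by omega)]
      by_cases hlen : 3 ≤ w.length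
      · rw [if_pos hlen]
      · rw [if_neg hlen]
        have : PySem.List.slice w (some (-3)) none = w := by
          rw [PySem.List.slice_from_neg_ofNat w 3 (by omega)]
          have h0 : w.length - 3 = 0 := by omega
          rw [h0, List.drop_zero]
        rw [this]
    · rw [if_neg h3, if_pos (show 3 ≤ (w.drop k).length by omega)]
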